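-- pv_equiv track=rewrite | github.com/pnkmem433/pnk_kdh | tasmota/Tasmota/lib/libesp32/berry/berry_port/be_jsonlib.py | check_json_number
-- ===== SOURCE A (Python) =====
-- def is_space(c):
--     return c in (' ', '\t', '\r', '\n')
--
-- def is_digit(c):
--     return '0' <= c <= '9'
--
-- JSON_NUMBER_INVALID = 0
--
-- JSON_NUMBER_INTEGER = 1
--
-- JSON_NUMBER_REAL = 2
--
-- def check_json_number(s, pos):
--     """Validate a JSON number starting at pos.
--     Returns (number_type, end_pos) where number_type is one of
--     JSON_NUMBER_INVALID, JSON_NUMBER_INTEGER, JSON_NUMBER_REAL.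
--     end_pos is the position after the last character of the number."""
--     if pos >= len(s):
--         return (JSON_NUMBER_INVALID, pos)
--
--     p = pos
--     has_fraction = False
--     has_exponent = False
--
--     # Skip leading whitespace
--     while p < len(s) and is_space(s[p]):
--         p += 1
--
--     if p >= len(s):
--         return (JSON_NUMBER_INVALID, p)
--
--     # Handle optional minus sign
--     if s[p] == '-':
--         p += 1
--         if p >= len(s):
--             return (JSON_NUMBER_INVALID, p)
--
--     # Integer part
--     if p < len(s) and s[p] == '0':
--         # If starts with 0, next char must not be a digit
--         p += 1
--         if p < len(s) and is_digit(s[p]):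
--             return (JSON_NUMBER_INVALID, p)  # Leading zeros not allowed
--     elif p < len(s) and is_digit(s[p]):
--         # First digit must be 1-9, then any digits
--         p += 1
--         while p < len(s) and is_digit(s[p]):
--             p += 1
--     else:
--         return (JSON_NUMBER_INVALID, p)  # Must start with digit
--
--     # Optional fractional part
--     if p < len(s) and s[p] == '.':
--         has_fraction = True
--         p += 1
--         if p >= len(s) or not is_digit(s[p]):
--             return (JSON_NUMBER_INVALID, p)  # Must have at least one digit after decimal point
--         while p < len(s) and is_digit(s[p]):
--             p += 1
--
--     # Optional exponent part
--     if p < len(s) and s[p] in ('e', 'E'):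
--         has_exponent = True
--         p += 1
--         # Optional sign in exponent
--         if p < len(s) and s[p] in ('+', '-'):
--             p += 1
--         if p >= len(s) or not is_digit(s[p]):
--             return (JSON_NUMBER_INVALID, p)  # Must have at least one digit in exponent
--         while p < len(s) and is_digit(s[p]):
--             p += 1
--
--     # Number ends here - check that next char is not a continuation
--     if p < len(s) and not is_space(s[p]) and s[p] not in (',', ']', '}', ':'):
--         return (JSON_NUMBER_INVALID, p)
--
--     # Determine return value based on what was found
--     if has_exponent or has_fraction:
--         return (JSON_NUMBER_REAL, p)
--     else:
--         return (JSON_NUMBER_INTEGER, p)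
-- ===== SOURCE B (Python) =====
-- # Table-driven DFA re-implementation (alternative structure; same results as A).
-- def is_space(c):
--     return c in (' ', '\t', '\r', '\n')
--
-- JSON_NUMBER_INVALID = 0
-- JSON_NUMBER_INTEGER = 1
-- JSON_NUMBER_REAL = 2
--
-- # DFA states
-- _START, _SIGN, _ZERO, _INT, _DOT, _FRAC, _E, _ESIGN, _EXP = range(9)
-- # accepting states and the number type they yield
-- _ACCEPT = {_ZERO: JSON_NUMBER_INTEGER, _INT: JSON_NUMBER_INTEGER,
--            _FRAC: JSON_NUMBER_REAL, _EXP: JSON_NUMBER_REAL}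
--
-- def _step(state, c):
--     digit = '0' <= c <= '9'
--     if state == _START or state == _SIGN:
--         if c == '-' and state == _START:
--             return _SIGN
--         if c == '0':
--             return _ZERO
--         return _INT if digit else None
--     if state == _ZERO:
--         if c == '.':
--             return _DOT
--         return _E if c in 'eE' else None
--     if state == _INT:
--         if digit:
--             return _INT
--         if c == '.':
--             return _DOT
--         return _E if c in 'eE' else None
--     if state == _DOT:
--         return _FRAC if digit else None
--     if state == _FRAC:
--         if digit:
--             return _FRAC
--         return _E if c in 'eE' else None
--     if state == _E:
--         if c in '+-':
--             return _ESIGN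
--         return _EXP if digit else None
--     # _ESIGN or _EXP
--     return _EXP if digit else None
--
-- def check_json_number(s, pos):
--     n = len(s)
--     if pos >= n:
--         return (JSON_NUMBER_INVALID, pos)
--     p = pos
--     while p < n and is_space(s[p]):
--         p += 1
--     state = _START
--     while p < n:
--         c = s[p]
--         if state in _ACCEPT and (is_space(c) or c in ',]}:'):
--             return (_ACCEPT[state], p)
--         nxt = _step(state, c)
--         if nxt is None:
--             return (JSON_NUMBER_INVALID, p)
--         state = nxt
--         p += 1
--     return (_ACCEPT.get(state, JSON_NUMBER_INVALID), p)
-- ===== Notes on version B (the rewrite author's own statement) =====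
-- stated objective: alternative
-- what changed: Replaced A's sequential phase-by-phase scanner (sign, integer part, fraction, exponent, terminator check as separate code blocks with early returns) by a table-driven DFA: a single scanning loop over explicit integer states with a transition function and an accepting-state table.
import Mathlib
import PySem

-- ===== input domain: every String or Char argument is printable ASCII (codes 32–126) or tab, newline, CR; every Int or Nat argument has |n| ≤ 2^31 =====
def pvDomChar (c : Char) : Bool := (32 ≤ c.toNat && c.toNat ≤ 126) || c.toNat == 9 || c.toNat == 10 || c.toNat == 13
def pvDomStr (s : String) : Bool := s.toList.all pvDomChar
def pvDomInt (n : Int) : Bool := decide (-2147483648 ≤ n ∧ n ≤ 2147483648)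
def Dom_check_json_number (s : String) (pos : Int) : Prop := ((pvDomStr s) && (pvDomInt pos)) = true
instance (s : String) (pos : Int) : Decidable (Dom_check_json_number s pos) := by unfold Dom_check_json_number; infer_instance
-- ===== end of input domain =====

-- B is a table-driven DFA (single scanning loop over states) replacing A's phase-by-phase scanner; same results, similar cost ("alternative").
-- Shared character predicates (Python's is_space / is_digit and the terminator set).
def pvIsSpace (c : Char) : Bool := c = ' ' || c = '\t' || c = '\r' || c = '\n'
def pvIsDigit (c : Char) : Bool := decide ('0' ≤ c ∧ c ≤ '9')
def pvIsStop (c : Char) : Bool := pvIsSpace c || c = ',' || c = ']' || c = '}' || c = ':'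
-- s[p] with Python's negative-index wraparound; the ' ' default only fires outside Pre_ (where Python raises IndexError).
def pvGet (cs : List Char) (p : Int) : Char := (PySem.List.pyGet? cs p).getD ' '

-- ===== PORT A =====
-- A's leading-whitespace while-loop
def aSkipWs (cs : List Char) (p : Int) : Int :=
  if _h : p < (cs.length : Int) ∧ pvIsSpace (pvGet cs p) = true then aSkipWs cs (p + 1) else p
termination_by ((cs.length : Int) - p).toNat
decreasing_by omega

-- A's "while p < len(s) and is_digit(s[p]): p += 1"
def aDigits (cs : List Char) (p : Int) : Int :=
  if _h : p < (cs.length : Int) ∧ pvIsDigit (pvGet cs p) = true then aDigits cs (p + 1) else p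
termination_by ((cs.length : Int) - p).toNat
decreasing_by omega

-- A's final terminator check and return value (hf/he = has_fraction/has_exponent)
def aTail (cs : List Char) (hf he : Bool) (p : Int) : Int × Int :=
  if p < (cs.length : Int) ∧ pvIsStop (pvGet cs p) = false then (0, p)
  else if he || hf then (2, p) else (1, p)

-- A's exponent body after consuming 'e'/'E'
def aExpBody (cs : List Char) (hf : Bool) (p : Int) : Int × Int :=
  let p1 := if p < (cs.length : Int) ∧ (pvGet cs p = '+' ∨ pvGet cs p = '-') then p + 1 else p
  if (cs.length : Int) ≤ p1 ∨ pvIsDigit (pvGet cs p1) = false then (0, p1)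
  else aTail cs hf true (aDigits cs p1)

def aExp (cs : List Char) (hf : Bool) (p : Int) : Int × Int :=
  if p < (cs.length : Int) ∧ (pvGet cs p = 'e' ∨ pvGet cs p = 'E') then aExpBody cs hf (p + 1)
  else aTail cs hf false p

-- A's fraction body after consuming '.'
def aFracBody (cs : List Char) (p : Int) : Int × Int :=
  if (cs.length : Int) ≤ p ∨ pvIsDigit (pvGet cs p) = false then (0, p)
  else aExp cs true (aDigits cs p)

def aFrac (cs : List Char) (p : Int) : Int × Int :=
  if p < (cs.length : Int) ∧ pvGet cs p = '.' then aFracBody cs (p + 1)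
  else aExp cs false p

-- A's integer part (leading-zero rule)
def aInt (cs : List Char) (p : Int) : Int × Int :=
  if p < (cs.length : Int) ∧ pvGet cs p = '0' then
    (if p + 1 < (cs.length : Int) ∧ pvIsDigit (pvGet cs (p + 1)) = true then (0, p + 1)
     else aFrac cs (p + 1))
  else if p < (cs.length : Int) ∧ pvIsDigit (pvGet cs p) = true then aFrac cs (aDigits cs (p + 1))
  else (0, p)

def check_json_number (s : String) (pos : Int) : Int × Int :=
  let cs := s.toList
  if (cs.length : Int) ≤ pos then (0, pos)
  else
    let p := aSkipWs cs pos
    if (cs.length : Int) ≤ p then (0, p)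
    else if pvGet cs p = '-' then
      (if (cs.length : Int) ≤ p + 1 then (0, p + 1) else aInt cs (p + 1))
    else aInt cs p

-- ===== PORT B =====
-- DFA states: 0 START, 1 SIGN, 2 ZERO, 3 INT, 4 DOT, 5 FRAC, 6 E, 7 ESIGN, 8 EXP
def bStep (st : Int) (c : Char) : Option Int :=
  if st = 0 ∨ st = 1 then
    if c = '-' ∧ st = 0 then some 1
    else if c = '0' then some 2
    else if pvIsDigit c then some 3 else none
  else if st = 2 then
    if c = '.' then some 4 else if c = 'e' ∨ c = 'E' then some 6 else none
  else if st = 3 then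
    if pvIsDigit c then some 3
    else if c = '.' then some 4
    else if c = 'e' ∨ c = 'E' then some 6 else none
  else if st = 4 then
    if pvIsDigit c then some 5 else none
  else if st = 5 then
    if pvIsDigit c then some 5 else if c = 'e' ∨ c = 'E' then some 6 else none
  else if st = 6 then
    if c = '+' ∨ c = '-' then some 7 else if pvIsDigit c then some 8 else none
  else
    if pvIsDigit c then some 8 else none

-- accepting states and the number type they yield
def bAcc (st : Int) : Option Int :=
  if st = 2 ∨ st = 3 then some 1 else if st = 5 ∨ st = 8 then some 2 else none

-- B's single DFA loop
def bLoop (cs : List Char) (st p : Int) : Int × Int :=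
  if _h : p < (cs.length : Int) then
    let c := pvGet cs p
    if (bAcc st).isSome ∧ pvIsStop c = true then ((bAcc st).getD 0, p)
    else
      match bStep st c with
      | none => (0, p)
      | some st' => bLoop cs st' (p + 1)
  else ((bAcc st).getD 0, p)
termination_by ((cs.length : Int) - p).toNat
decreasing_by omega

-- B's leading-whitespace while-loop
def bSkipWs (cs : List Char) (p : Int) : Int :=
  if _h : p < (cs.length : Int) ∧ pvIsSpace (pvGet cs p) = true then bSkipWs cs (p + 1) else p
termination_by ((cs.length : Int) - p).toNat
decreasing_by omega

def check_json_number_alt (s : String) (pos : Int) : Int × Int :=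
  let cs := s.toList
  if (cs.length : Int) ≤ pos then (0, pos)
  else bLoop cs 0 (bSkipWs cs pos)

-- ===== PRECONDITION & SPEC =====
-- Pre_ excludes exactly pos < -len(s), where the Python A (and B) raise IndexError on s[p].
def Pre_check_json_number (s : String) (pos : Int) : Prop := -(s.toList.length : Int) ≤ pos
instance (s : String) (pos : Int) : Decidable (Pre_check_json_number s pos) := by
  unfold Pre_check_json_number; infer_instance
def pvWitness_check_json_number : String × Int := ("1", 0)

def Spec_check_json_number (s : String) (pos : Int) (out : Int × Int) : Prop := out = check_json_number_alt s pos
instance (s : String) (pos : Int) (out : Int × Int) : Decidable (Spec_check_json_number s pos out) := by unfold Spec_check_json_number; infer_instance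

-- ===== CLAIM (what is proved, stated in full; the proofs are below) =====
def Claim_equal_check_json_number : Prop := ∀ (s : String) (pos : Int), Dom_check_json_number s pos → Pre_check_json_number s pos → Spec_check_json_number s pos (check_json_number s pos)

-- ===== LEMMAS AND PROOFS =====

-- bounded descending induction on an Int position
lemma pvIntRec (L : Int) (P : Int → Prop) (base : ∀ p, L ≤ p → P p)
    (step : ∀ p, p < L → P (p + 1) → P p) : ∀ p, P p := by
  have H : ∀ n p, (L - p).toNat ≤ n → P p := by
    intro n
    induction n with
    | zero => intro p hp; exact base p (by omega)
    | succ n ih =>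
      intro p hp
      by_cases h : p < L
      · exact step p h (ih (p + 1) (by omega))
      · exact base p (by omega)
  exact fun p => H (L - p).toNat p le_rfl

lemma pv_digit_facts (c : Char) (h : pvIsDigit c = true) :
    pvIsStop c = false ∧ c ≠ '.' ∧ c ≠ 'e' ∧ c ≠ 'E' ∧ c ≠ '+' ∧ c ≠ '-' := by
  obtain ⟨h0, h9⟩ := of_decide_eq_true h
  have hne : ∀ d : Char, ¬('0' ≤ d ∧ d ≤ '9') → c ≠ d := by
    rintro d hd rfl; exact hd ⟨h0, h9⟩
  refine ⟨?_, hne _ (by decide), hne _ (by decide), hne _ (by decide), hne _ (by decide),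
    hne _ (by decide)⟩
  simp only [pvIsStop, pvIsSpace, Bool.or_eq_false_iff, decide_eq_false_iff_not]
  exact ⟨⟨⟨⟨⟨⟨⟨hne _ (by decide), hne _ (by decide)⟩, hne _ (by decide)⟩, hne _ (by decide)⟩,
    hne _ (by decide)⟩, hne _ (by decide)⟩, hne _ (by decide)⟩, hne _ (by decide)⟩

-- evaluation lemmas for the DFA tables
lemma bAcc_0 : bAcc 0 = none := by decide
lemma bAcc_1 : bAcc 1 = none := by decide
lemma bAcc_2 : bAcc 2 = some 1 := by decide
lemma bAcc_3 : bAcc 3 = some 1 := by decide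
lemma bAcc_4 : bAcc 4 = none := by decide
lemma bAcc_5 : bAcc 5 = some 2 := by decide
lemma bAcc_6 : bAcc 6 = none := by decide
lemma bAcc_7 : bAcc 7 = none := by decide
lemma bAcc_8 : bAcc 8 = some 2 := by decide

lemma bStep_0 (c : Char) : bStep 0 c =
    (if c = '-' then some 1 else if c = '0' then some 2 else if pvIsDigit c then some 3 else none) := by
  norm_num [bStep]
lemma bStep_1 (c : Char) : bStep 1 c =
    (if c = '0' then some 2 else if pvIsDigit c then some 3 else none) := by
  norm_num [bStep]
lemma bStep_2 (c : Char) : bStep 2 c =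
    (if c = '.' then some 4 else if c = 'e' ∨ c = 'E' then some 6 else none) := by
  norm_num [bStep]
lemma bStep_3 (c : Char) : bStep 3 c =
    (if pvIsDigit c then some 3 else if c = '.' then some 4
     else if c = 'e' ∨ c = 'E' then some 6 else none) := by
  norm_num [bStep]
lemma bStep_4 (c : Char) : bStep 4 c = (if pvIsDigit c then some 5 else none) := by
  norm_num [bStep]
lemma bStep_5 (c : Char) : bStep 5 c =
    (if pvIsDigit c then some 5 else if c = 'e' ∨ c = 'E' then some 6 else none) := by
  norm_num [bStep]
lemma bStep_6 (c : Char) : bStep 6 c =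
    (if c = '+' ∨ c = '-' then some 7 else if pvIsDigit c then some 8 else none) := by
  norm_num [bStep]
lemma bStep_7 (c : Char) : bStep 7 c = (if pvIsDigit c then some 8 else none) := by
  norm_num [bStep]
lemma bStep_8 (c : Char) : bStep 8 c = (if pvIsDigit c then some 8 else none) := by
  norm_num [bStep]

lemma aDigits_step (cs : List Char) (p : Int) (h : p < (cs.length : Int))
    (hd : pvIsDigit (pvGet cs p) = true) : aDigits cs p = aDigits cs (p + 1) := by
  rw [aDigits, dif_pos ⟨h, hd⟩]

lemma aDigits_stop (cs : List Char) (p : Int)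
    (h : ¬(p < (cs.length : Int) ∧ pvIsDigit (pvGet cs p) = true)) : aDigits cs p = p := by
  rw [aDigits, dif_neg h]

lemma aFrac_eof (cs : List Char) (p : Int) (h : (cs.length : Int) ≤ p) : aFrac cs p = (1, p) := by
  rw [aFrac, if_neg (fun hh => absurd hh.1 (by omega)), aExp,
    if_neg (fun hh => absurd hh.1 (by omega)), aTail, if_neg (fun hh => absurd hh.1 (by omega))]
  simp

lemma aInt_eof (cs : List Char) (p : Int) (h : (cs.length : Int) ≤ p) : aInt cs p = (0, p) := by
  rw [aInt, if_neg (fun hh => absurd hh.1 (by omega)), if_neg (fun hh => absurd hh.1 (by omega))]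

-- state EXP (8): B's loop finishes the exponent digits and accepts as A's tail does
lemma L_EXP (cs : List Char) (hf : Bool) :
    ∀ p, bLoop cs 8 p = aTail cs hf true (aDigits cs p) := by
  refine pvIntRec (cs.length : Int) _ ?_ ?_
  · intro p hL
    rw [bLoop, dif_neg (by omega), aDigits_stop cs p (by omega), aTail, if_neg (by omega)]
    simp [bAcc_8]
  · intro p hL ih
    rw [bLoop, dif_pos hL]
    simp only [bAcc_8, Option.isSome_some, true_and, Option.getD_some, bStep_8]
    by_cases hd : pvIsDigit (pvGet cs p) = true
    · obtain ⟨hstop, -, -, -, -, -⟩ := pv_digit_facts _ hd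
      rw [if_neg (by simp [hstop]), if_pos hd, aDigits_step cs p hL hd]
      exact ih
    · rw [aDigits_stop cs p (by tauto)]
      by_cases hstop : pvIsStop (pvGet cs p) = true
      · rw [if_pos hstop, aTail, if_neg (by simp [hstop])]
        simp
      · rw [if_neg hstop, if_neg hd, aTail, if_pos ⟨hL, by simpa using hstop⟩]

-- state ESIGN (7)
lemma L_ESIGN (cs : List Char) (hf : Bool) (p : Int) :
    bLoop cs 7 p = if (cs.length : Int) ≤ p ∨ pvIsDigit (pvGet cs p) = false then (0, p)
      else aTail cs hf true (aDigits cs p) := by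
  by_cases hL : p < (cs.length : Int)
  · rw [bLoop, dif_pos hL]
    simp only [bAcc_7, Option.isSome_none, Bool.false_eq_true, false_and, if_false, bStep_7]
    by_cases hd : pvIsDigit (pvGet cs p) = true
    · rw [if_pos hd, if_neg (by simp [hL, hd]), aDigits_step cs p hL hd]
      exact L_EXP cs hf (p + 1)
    · rw [if_neg hd, if_pos (Or.inr (by simpa using hd))]
  · rw [bLoop, dif_neg (by omega), if_pos (Or.inl (by omega))]
    simp [bAcc_7]

-- state E (6): B's loop from 'after e' matches A's exponent body
lemma L_E (cs : List Char) (hf : Bool) (p : Int) : bLoop cs 6 p = aExpBody cs hf p := by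
  by_cases hL : p < (cs.length : Int)
  · rw [bLoop, dif_pos hL]
    simp only [bAcc_6, Option.isSome_none, Bool.false_eq_true, false_and, if_false, bStep_6]
    by_cases hsign : pvGet cs p = '+' ∨ pvGet cs p = '-'
    · rw [if_pos hsign, aExpBody]
      simp only [if_pos (show p < (cs.length : Int) ∧ (pvGet cs p = '+' ∨ pvGet cs p = '-') from ⟨hL, hsign⟩)]
      exact L_ESIGN cs hf (p + 1)
    · rw [if_neg hsign, aExpBody]
      simp only [if_neg (show ¬(p < (cs.length : Int) ∧ (pvGet cs p = '+' ∨ pvGet cs p = '-')) from fun hh => hsign hh.2)]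
      by_cases hd : pvIsDigit (pvGet cs p) = true
      · rw [if_pos hd, if_neg (by simp [hL, hd]), aDigits_step cs p hL hd]
        exact L_EXP cs hf (p + 1)
      · rw [if_neg hd, if_pos (Or.inr (by simpa using hd))]
  · rw [bLoop, dif_neg (by omega), aExpBody]
    simp only [if_neg (show ¬(p < (cs.length : Int) ∧ (pvGet cs p = '+' ∨ pvGet cs p = '-')) from fun hh => absurd hh.1 (by omega))]
    rw [if_pos (Or.inl (by omega))]
    simp [bAcc_6]

-- state FRAC (5)
lemma L_FRAC (cs : List Char) :
    ∀ p, bLoop cs 5 p = aExp cs true (aDigits cs p) := by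
  refine pvIntRec (cs.length : Int) _ ?_ ?_
  · intro p hL
    rw [bLoop, dif_neg (by omega), aDigits_stop cs p (by omega), aExp,
      if_neg (fun hh => absurd hh.1 (by omega)), aTail, if_neg (fun hh => absurd hh.1 (by omega))]
    simp [bAcc_5]
  · intro p hL ih
    rw [bLoop, dif_pos hL]
    simp only [bAcc_5, Option.isSome_some, true_and, Option.getD_some, bStep_5]
    by_cases hd : pvIsDigit (pvGet cs p) = true
    · obtain ⟨hstop, -, -, -, -, -⟩ := pv_digit_facts _ hd
      rw [if_neg (by simp [hstop]), if_pos hd, aDigits_step cs p hL hd]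
      exact ih
    · rw [aDigits_stop cs p (by tauto)]
      by_cases he : pvGet cs p = 'e' ∨ pvGet cs p = 'E'
      · have hstop : pvIsStop (pvGet cs p) = false := by rcases he with h | h <;> rw [h] <;> decide
        rw [if_neg (by simp [hstop]), if_neg hd, if_pos he, aExp, if_pos ⟨hL, he⟩]
        exact L_E cs true (p + 1)
      · by_cases hstop : pvIsStop (pvGet cs p) = true
        · rw [if_pos hstop, aExp, if_neg (fun hh => he hh.2), aTail, if_neg (by simp [hstop])]
          simp
        · rw [if_neg hstop, if_neg hd, if_neg he, aExp, if_neg (fun hh => he hh.2), aTail,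
            if_pos ⟨hL, by simpa using hstop⟩]

-- state DOT (4)
lemma L_DOT (cs : List Char) (p : Int) : bLoop cs 4 p = aFracBody cs p := by
  by_cases hL : p < (cs.length : Int)
  · rw [bLoop, dif_pos hL]
    simp only [bAcc_4, Option.isSome_none, Bool.false_eq_true, false_and, if_false, bStep_4]
    by_cases hd : pvIsDigit (pvGet cs p) = true
    · rw [if_pos hd, aFracBody, if_neg (by simp [hL, hd]), aDigits_step cs p hL hd]
      exact L_FRAC cs (p + 1)
    · rw [if_neg hd, aFracBody, if_pos (Or.inr (by simpa using hd))]
  · rw [bLoop, dif_neg (by omega), aFracBody, if_pos (Or.inl (by omega))]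
    simp [bAcc_4]

-- state INT (3)
lemma L_INT (cs : List Char) :
    ∀ p, bLoop cs 3 p = aFrac cs (aDigits cs p) := by
  refine pvIntRec (cs.length : Int) _ ?_ ?_
  · intro p hL
    rw [bLoop, dif_neg (by omega), aDigits_stop cs p (by omega), aFrac_eof cs p (by omega)]
    simp [bAcc_3]
  · intro p hL ih
    rw [bLoop, dif_pos hL]
    simp only [bAcc_3, Option.isSome_some, true_and, Option.getD_some, bStep_3]
    by_cases hd : pvIsDigit (pvGet cs p) = true
    · obtain ⟨hstop, -, -, -, -, -⟩ := pv_digit_facts _ hd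
      rw [if_neg (by simp [hstop]), if_pos hd, aDigits_step cs p hL hd]
      exact ih
    · rw [aDigits_stop cs p (by tauto)]
      by_cases hdot : pvGet cs p = '.'
      · have hstop : pvIsStop (pvGet cs p) = false := by rw [hdot]; decide
        rw [if_neg (by simp [hstop]), if_neg hd, if_pos hdot, aFrac, if_pos ⟨hL, hdot⟩]
        exact L_DOT cs (p + 1)
      · by_cases he : pvGet cs p = 'e' ∨ pvGet cs p = 'E'
        · have hstop : pvIsStop (pvGet cs p) = false := by rcases he with h | h <;> rw [h] <;> decide
          rw [if_neg (by simp [hstop]), if_neg hd, if_neg hdot, if_pos he, aFrac,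
            if_neg (fun hh => hdot hh.2), aExp, if_pos ⟨hL, he⟩]
          exact L_E cs false (p + 1)
        · by_cases hstop : pvIsStop (pvGet cs p) = true
          · rw [if_pos hstop, aFrac, if_neg (fun hh => hdot hh.2), aExp,
              if_neg (fun hh => he hh.2), aTail, if_neg (by simp [hstop])]
            simp
          · rw [if_neg hstop, if_neg hd, if_neg hdot, if_neg he, aFrac,
              if_neg (fun hh => hdot hh.2), aExp, if_neg (fun hh => he hh.2), aTail,
              if_pos ⟨hL, by simpa using hstop⟩]

-- state ZERO (2)
lemma L_ZERO (cs : List Char) (p : Int) :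
    bLoop cs 2 p = if p < (cs.length : Int) ∧ pvIsDigit (pvGet cs p) = true then (0, p)
      else aFrac cs p := by
  by_cases hL : p < (cs.length : Int)
  · rw [bLoop, dif_pos hL]
    simp only [bAcc_2, Option.isSome_some, true_and, Option.getD_some, bStep_2]
    by_cases hd : pvIsDigit (pvGet cs p) = true
    · obtain ⟨hstop, hdot, hee, heE, -, -⟩ := pv_digit_facts _ hd
      rw [if_neg (by simp [hstop]), if_neg hdot,
        if_neg (show ¬(pvGet cs p = 'e' ∨ pvGet cs p = 'E') by tauto),
        if_pos (show p < (cs.length : Int) ∧ pvIsDigit (pvGet cs p) = true from ⟨hL, hd⟩)]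
    · by_cases hdot : pvGet cs p = '.'
      · have hstop : pvIsStop (pvGet cs p) = false := by rw [hdot]; decide
        rw [if_neg (by simp [hstop]), if_pos hdot,
          if_neg (show ¬(p < (cs.length : Int) ∧ pvIsDigit (pvGet cs p) = true) from
            fun hh => hd hh.2), aFrac, if_pos ⟨hL, hdot⟩]
        exact L_DOT cs (p + 1)
      · by_cases he : pvGet cs p = 'e' ∨ pvGet cs p = 'E'
        · have hstop : pvIsStop (pvGet cs p) = false := by
            rcases he with h | h <;> rw [h] <;> decide
          rw [if_neg (by simp [hstop]), if_neg hdot, if_pos he,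
            if_neg (show ¬(p < (cs.length : Int) ∧ pvIsDigit (pvGet cs p) = true) from
              fun hh => hd hh.2), aFrac,
            if_neg (show ¬(p < (cs.length : Int) ∧ pvGet cs p = '.') from fun hh => hdot hh.2),
            aExp, if_pos ⟨hL, he⟩]
          exact L_E cs false (p + 1)
        · by_cases hstop : pvIsStop (pvGet cs p) = true
          · rw [if_pos hstop,
              if_neg (show ¬(p < (cs.length : Int) ∧ pvIsDigit (pvGet cs p) = true) from
                fun hh => hd hh.2), aFrac,
              if_neg (show ¬(p < (cs.length : Int) ∧ pvGet cs p = '.') from fun hh => hdot hh.2),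
              aExp, if_neg (show ¬(p < (cs.length : Int) ∧ (pvGet cs p = 'e' ∨ pvGet cs p = 'E'))
                from fun hh => he hh.2), aTail, if_neg (by simp [hstop])]
            simp
          · rw [if_neg hstop, if_neg hdot, if_neg he,
              if_neg (show ¬(p < (cs.length : Int) ∧ pvIsDigit (pvGet cs p) = true) from
                fun hh => hd hh.2), aFrac,
              if_neg (show ¬(p < (cs.length : Int) ∧ pvGet cs p = '.') from fun hh => hdot hh.2),
              aExp, if_neg (show ¬(p < (cs.length : Int) ∧ (pvGet cs p = 'e' ∨ pvGet cs p = 'E'))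
                from fun hh => he hh.2), aTail, if_pos ⟨hL, by simpa using hstop⟩]
  · rw [bLoop, dif_neg (by omega),
      if_neg (show ¬(p < (cs.length : Int) ∧ pvIsDigit (pvGet cs p) = true) from
        fun hh => absurd hh.1 (by omega)), aFrac_eof cs p (by omega)]
    simp [bAcc_2]

-- state SIGN (1)
lemma L_SIGN (cs : List Char) (p : Int) : bLoop cs 1 p = aInt cs p := by
  by_cases hL : p < (cs.length : Int)
  · rw [bLoop, dif_pos hL]
    simp only [bAcc_1, Option.isSome_none, Bool.false_eq_true, false_and, if_false, bStep_1]
    by_cases hzero : pvGet cs p = '0'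
    · rw [if_pos hzero, aInt, if_pos ⟨hL, hzero⟩]
      exact L_ZERO cs (p + 1)
    · rw [if_neg hzero]
      by_cases hd : pvIsDigit (pvGet cs p) = true
      · rw [if_pos hd, aInt, if_neg (fun hh => hzero hh.2), if_pos ⟨hL, hd⟩]
        exact L_INT cs (p + 1)
      · rw [if_neg hd, aInt, if_neg (fun hh => hzero hh.2), if_neg (fun hh => hd hh.2)]
  · rw [bLoop, dif_neg (by omega), aInt_eof cs p (by omega)]
    simp [bAcc_1]

-- state START (0)
lemma L_START (cs : List Char) (p : Int) :
    bLoop cs 0 p = if p < (cs.length : Int) ∧ pvGet cs p = '-' then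
        (if (cs.length : Int) ≤ p + 1 then (0, p + 1) else aInt cs (p + 1))
      else aInt cs p := by
  by_cases hL : p < (cs.length : Int)
  · rw [bLoop, dif_pos hL]
    simp only [bAcc_0, Option.isSome_none, Bool.false_eq_true, false_and, if_false, bStep_0]
    by_cases hminus : pvGet cs p = '-'
    · rw [if_pos hminus, if_pos ⟨hL, hminus⟩]
      by_cases hL1 : (cs.length : Int) ≤ p + 1
      · rw [if_pos hL1]
        exact (L_SIGN cs (p + 1)).trans (aInt_eof cs (p + 1) hL1)
      · rw [if_neg hL1]
        exact L_SIGN cs (p + 1)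
    · rw [if_neg hminus,
        if_neg (show ¬(p < (cs.length : Int) ∧ pvGet cs p = '-') from fun hh => hminus hh.2)]
      by_cases hzero : pvGet cs p = '0'
      · rw [if_pos hzero, aInt, if_pos ⟨hL, hzero⟩]
        exact L_ZERO cs (p + 1)
      · rw [if_neg hzero]
        by_cases hd : pvIsDigit (pvGet cs p) = true
        · rw [if_pos hd, aInt, if_neg (fun hh => hzero hh.2), if_pos ⟨hL, hd⟩]
          exact L_INT cs (p + 1)
        · rw [if_neg hd, aInt, if_neg (fun hh => hzero hh.2), if_neg (fun hh => hd hh.2)]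
  · rw [bLoop, dif_neg (by omega), if_neg (fun hh => absurd hh.1 (by omega)),
      aInt_eof cs p (by omega)]
    simp [bAcc_0]

-- the two whitespace-skipping loops are the same function
lemma skip_eq (cs : List Char) : ∀ p, aSkipWs cs p = bSkipWs cs p := by
  refine pvIntRec (cs.length : Int) _ ?_ ?_
  · intro p hL
    rw [aSkipWs, dif_neg (fun hh => absurd hh.1 (by omega)),
      bSkipWs, dif_neg (fun hh => absurd hh.1 (by omega))]
  · intro p hL ih
    by_cases hs : pvIsSpace (pvGet cs p) = true
    · rw [aSkipWs, dif_pos ⟨hL, hs⟩, bSkipWs, dif_pos ⟨hL, hs⟩]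
      exact ih
    · rw [aSkipWs, dif_neg (fun hh => hs hh.2), bSkipWs, dif_neg (fun hh => hs hh.2)]

-- ===== VERDICT (by name: the statement is the Claim_ definition above) =====
theorem check_json_number_spec : Claim_equal_check_json_number := by
  intro s pos _hdom _hpre
  unfold Spec_check_json_number check_json_number check_json_number_alt
  by_cases h0 : (s.toList.length : Int) ≤ pos
  · rw [if_pos h0, if_pos h0]
  · rw [if_neg h0, if_neg h0, ← skip_eq s.toList pos, L_START s.toList (aSkipWs s.toList pos)]
    by_cases hp : (s.toList.length : Int) ≤ aSkipWs s.toList pos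
    · rw [if_pos hp, if_neg (fun hh => absurd hh.1 (by omega)),
        aInt_eof s.toList (aSkipWs s.toList pos) hp]
    · rw [if_neg hp]
      by_cases hm : pvGet s.toList (aSkipWs s.toList pos) = '-'
      · rw [if_pos hm, if_pos (show aSkipWs s.toList pos < (s.toList.length : Int) ∧
          pvGet s.toList (aSkipWs s.toList pos) = '-' from ⟨by omega, hm⟩)]
      · rw [if_neg hm, if_neg (show ¬(aSkipWs s.toList pos < (s.toList.length : Int) ∧
          pvGet s.toList (aSkipWs s.toList pos) = '-') from fun hh => hm hh.2)]
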